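-- pv_equiv track=rewrite | github.com/ffavour/TPSIT | eserciziVacanze/9_3.py | trovaCombinazione
-- ===== SOURCE A (Python) =====
-- import itertools
--
-- def evita(parola, lettere_vietate):
--     for lettera in lettere_vietate:
--         if lettera in parola:
--             return False
--     return True
--
-- def paroleNonEvitate(listaP, lettere_vietate):
--     listaOK = []
--     for elemento in listaP:
--         if evita(elemento, lettere_vietate):
--             listaOK.append(elemento)
--     return listaOK, len(listaOK)
--
-- def trovaCombinazione(parole):
--     combinazioni = itertools.combinations("abcdefghijklmnopqrstuvwxyz", 5)
--     combinazioneMinima = ""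
--
--     for combinazione in combinazioni:
--         lettere_vietate = "".join(combinazione)
--         listaPOK, nParoleOK = paroleNonEvitate(parole, lettere_vietate)
--         if nParoleOK > (len(parole) - nParoleOK):
--             combinazioneMinima = lettere_vietate
--
--     return combinazioneMinima
-- ===== SOURCE B (Python) =====
-- import itertools
--
-- def trovaCombinazione(parole):
--     # one pass: bitmask of lowercase letters per word
--     word_masks = []
--     for parola in parole:
--         m = 0
--         for ch in parola:
--             if 'a' <= ch <= 'z':
--                 m |= 1 << (ord(ch) - 97)
--         word_masks.append(m)
--     combinazioneMinima = ""
--     for combinazione in itertools.combinations("abcdefghijklmnopqrstuvwxyz", 5):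
--         cm = 0
--         for ch in combinazione:
--             cm |= 1 << (ord(ch) - 97)
--         n = 0
--         for wm in word_masks:
--             if wm & cm == 0:
--                 n += 1
--         if n * 2 > len(parole):
--             combinazioneMinima = "".join(combinazione)
--     return combinazioneMinima
-- ===== Notes on version B (the rewrite author's own statement) =====
-- stated objective: faster
-- what changed: Precompute one letter-bitmask per word in a single pass, then test each 5-letter combination with one OR-built mask and an integer AND-is-zero count instead of rebuilding a filtered word list with per-letter substring scans for every combination.
import Mathlib
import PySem

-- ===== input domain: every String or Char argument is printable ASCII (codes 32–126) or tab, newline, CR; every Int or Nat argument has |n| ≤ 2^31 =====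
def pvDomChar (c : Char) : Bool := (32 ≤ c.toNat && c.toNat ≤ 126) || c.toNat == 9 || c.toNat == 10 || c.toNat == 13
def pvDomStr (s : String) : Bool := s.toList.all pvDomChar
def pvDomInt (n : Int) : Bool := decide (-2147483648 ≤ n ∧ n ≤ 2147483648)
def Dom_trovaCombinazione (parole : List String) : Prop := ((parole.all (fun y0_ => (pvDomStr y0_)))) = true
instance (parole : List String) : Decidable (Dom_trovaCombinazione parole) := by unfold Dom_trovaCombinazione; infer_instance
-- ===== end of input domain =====

-- B replaces A's per-combination substring filtering by precomputed per-word letter bitmasks and an AND-is-zero count (faster, same results).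

-- the alphabet "abcdefghijklmnopqrstuvwxyz" as a list of chars (shared literal)
def pvAlphabet : List Char :=
  ['a','b','c','d','e','f','g','h','i','j','k','l','m','n','o','p','q','r','s','t','u','v','w','x','y','z']

-- ===== PORT A =====
-- evita(parola, lettere_vietate): 'lettera in parola' on a single char is char membership (exact)
def pvEvita (parola : List Char) : List Char → Bool
  | [] => true
  | l :: rest => if parola.contains l then false else pvEvita parola rest

def pvParoleNonEvitate (listaP : List String) (viet : List Char) : List String × Int :=
  let listaOK := listaP.foldl (fun acc e => if pvEvita e.toList viet then acc ++ [e] else acc) []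
  (listaOK, (listaOK.length : Int))

def trovaCombinazione (parole : List String) : String :=
  (PySem.List.combinations pvAlphabet 5).foldl (fun combinazioneMinima combinazione =>
    let r := pvParoleNonEvitate parole combinazione
    if r.2 > (parole.length : Int) - r.2 then String.ofList combinazione else combinazioneMinima) ""

-- ===== PORT B =====
def pvMask (w : List Char) : Nat :=
  w.foldl (fun m ch => if 'a' ≤ ch ∧ ch ≤ 'z' then m ||| (1 <<< (ch.toNat - 97)) else m) 0

def trovaCombinazione_alt (parole : List String) : String :=
  let wordMasks := parole.map (fun w => pvMask w.toList)
  (PySem.List.combinations pvAlphabet 5).foldl (fun combinazioneMinima combinazione =>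
    let cm := combinazione.foldl (fun m ch => m ||| (1 <<< (ch.toNat - 97))) 0
    let n : Int := wordMasks.foldl (fun n wm => if wm &&& cm == 0 then n + 1 else n) 0
    if n * 2 > (parole.length : Int) then String.ofList combinazione else combinazioneMinima) ""

-- ===== PRECONDITION & SPEC =====
def Spec_trovaCombinazione (parole : List String) (out : String) : Prop := out = trovaCombinazione_alt parole
instance (parole : List String) (out : String) : Decidable (Spec_trovaCombinazione parole out) := by unfold Spec_trovaCombinazione; infer_instance

-- ===== CLAIM (what is proved, stated in full; the proofs are below) =====
def Claim_equal_trovaCombinazione : Prop := ∀ (parole : List String), Dom_trovaCombinazione parole → Spec_trovaCombinazione parole (trovaCombinazione parole)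

-- ===== LEMMAS AND PROOFS =====

-- which bits a word mask has set
lemma pvMask_testBit (w : List Char) (m : Nat) (i : Nat) :
    Nat.testBit (w.foldl (fun m ch => if 'a' ≤ ch ∧ ch ≤ 'z' then m ||| (1 <<< (ch.toNat - 97)) else m) m) i
      = (Nat.testBit m i || w.any fun ch => decide ('a' ≤ ch ∧ ch ≤ 'z') && decide (ch.toNat - 97 = i)) := by
  induction w generalizing m with
  | nil => simp
  | cons c w ih =>
    rw [List.foldl_cons, ih]
    by_cases h : 'a' ≤ c ∧ c ≤ 'z'
    · simp [h, Nat.testBit_or, Nat.one_shiftLeft, Nat.testBit_two_pow, Bool.or_assoc]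
    · have hx : (decide ('a' ≤ c) && decide (c ≤ 'z')) = false := by
        rcases not_and_or.mp h with h1 | h1 <;> simp [h1]
      simp [h, hx]

-- which bits a combination mask has set
lemma pvCmask_testBit (c : List Char) (m : Nat) (i : Nat) :
    Nat.testBit (c.foldl (fun m ch => m ||| (1 <<< (ch.toNat - 97))) m) i
      = (Nat.testBit m i || c.any fun ch => decide (ch.toNat - 97 = i)) := by
  induction c generalizing m with
  | nil => simp
  | cons x c ih =>
    rw [List.foldl_cons, ih]
    simp [Nat.testBit_or, Nat.one_shiftLeft, Nat.testBit_two_pow, Bool.or_assoc]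

lemma char_of_sub97 {c d : Char} (hc : 'a' ≤ c ∧ c ≤ 'z') (hd : 'a' ≤ d ∧ d ≤ 'z')
    (h : c.toNat - 97 = d.toNat - 97) : c = d := by
  have hc' : 97 ≤ c.toNat := hc.1
  have hd' : 97 ≤ d.toNat := hd.1
  have : c.toNat = d.toNat := by omega
  have : c.val = d.val := by
    apply UInt32.toNat_inj.mp
    exact this
  exact Char.ext this

-- pvEvita as a pure membership statement
lemma pvEvita_iff (parola : List Char) (viet : List Char) :
    pvEvita parola viet = true ↔ ∀ l ∈ viet, l ∉ parola := by
  induction viet with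
  | nil => simp [pvEvita]
  | cons l rest ih =>
    by_cases h : parola.contains l
    · simp only [pvEvita, h, if_true, Bool.false_eq_true, false_iff]
      intro hall
      exact hall l (List.mem_cons_self) (List.contains_iff_mem.mp h)
    · simp only [pvEvita, h, if_false, Bool.false_eq_true, ih]
      constructor
      · intro hall l' hl'
        rcases List.mem_cons.mp hl' with rfl | hm
        · exact fun hmem => h (List.contains_iff_mem.mpr hmem)
        · exact hall l' hm
      · intro hall l' hl'
        exact hall l' (List.mem_cons_of_mem _ hl')

-- the core pointwise fact: AND-is-zero on masks = evita on letters
lemma pvMask_testBit' (w : List Char) (i : Nat) :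
    Nat.testBit (pvMask w) i = (w.any fun ch => decide ('a' ≤ ch ∧ ch ≤ 'z') && decide (ch.toNat - 97 = i)) := by
  unfold pvMask; rw [pvMask_testBit]; simp

lemma pvCmask_testBit' (c : List Char) (i : Nat) :
    Nat.testBit (c.foldl (fun m ch => m ||| (1 <<< (ch.toNat - 97))) 0) i
      = (c.any fun ch => decide (ch.toNat - 97 = i)) := by
  rw [pvCmask_testBit]; simp

lemma mask_and_zero_iff (w : List Char) (c : List Char) (hc : ∀ ch ∈ c, 'a' ≤ ch ∧ ch ≤ 'z') :
    ((pvMask w &&& c.foldl (fun m ch => m ||| (1 <<< (ch.toNat - 97))) 0 == 0) : Bool)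
      = pvEvita w c := by
  have key : (pvMask w &&& c.foldl (fun m ch => m ||| (1 <<< (ch.toNat - 97))) 0 = 0)
      ↔ (∀ l ∈ c, l ∉ w) := by
    constructor
    · intro h0 l hl hlw
      have h1 : Nat.testBit (pvMask w) (l.toNat - 97) = true := by
        rw [pvMask_testBit']
        exact List.any_eq_true.mpr ⟨l, hlw, by simp [hc l hl]⟩
      have h2 : Nat.testBit (c.foldl (fun m ch => m ||| (1 <<< (ch.toNat - 97))) 0) (l.toNat - 97) = true := by
        rw [pvCmask_testBit']
        exact List.any_eq_true.mpr ⟨l, hl, by simp⟩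
      have := congrArg (Nat.testBit · (l.toNat - 97)) h0
      simp [Nat.testBit_and, h1, h2] at this
    · intro hall
      apply Nat.zero_of_testBit_eq_false
      intro i
      rw [Nat.testBit_and]
      cases hcm : Nat.testBit (c.foldl (fun m ch => m ||| (1 <<< (ch.toNat - 97))) 0) i with
      | false => simp
      | true =>
        rw [pvCmask_testBit'] at hcm
        obtain ⟨l, hl, hi⟩ := List.any_eq_true.mp hcm
        have hw : Nat.testBit (pvMask w) i = false := by
          rw [pvMask_testBit']
          simp only [List.any_eq_false, Bool.and_eq_true, decide_eq_true_eq, not_and]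
          intro d hdw hd hid
          have hdl : d = l := char_of_sub97 hd (hc l hl) (by simp at hi; omega)
          exact absurd (hdl ▸ hdw) (hall l hl)
        simp [hw]
  rcases Bool.eq_false_or_eq_true (pvEvita w c) with h | h <;> rw [h]
  · simp [key.mpr ((pvEvita_iff w c).mp h)]
  · simp only [beq_eq_false_iff_ne, ne_eq]
    intro h0
    have := (pvEvita_iff w c).mpr (key.mp h0)
    rw [h] at this
    exact absurd this (by simp)

-- every char of the alphabet is a lowercase letter
lemma pvAlphabet_lower : ∀ ch ∈ pvAlphabet, 'a' ≤ ch ∧ ch ≤ 'z' := by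
  intro ch hch
  fin_cases hch <;> exact (by decide)

-- the two per-combination steps agree on every combination drawn from the alphabet
lemma step_eq (parole : List String) (c : List Char) (hc : ∀ ch ∈ c, 'a' ≤ ch ∧ ch ≤ 'z') (best : String) :
    (let r := pvParoleNonEvitate parole c
     if r.2 > (parole.length : Int) - r.2 then String.ofList c else best)
    = (let cm := c.foldl (fun m ch => m ||| (1 <<< (ch.toNat - 97))) 0
       let n : Int := (parole.map (fun w => pvMask w.toList)).foldl (fun n wm => if wm &&& cm == 0 then n + 1 else n) 0
       if n * 2 > (parole.length : Int) then String.ofList c else best) := by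
  have hA : (pvParoleNonEvitate parole c).2 = ((parole.countP fun e => pvEvita e.toList c : Nat) : Int) := by
    unfold pvParoleNonEvitate
    rw [PySem.List.foldl_append_if_eq_filter]
    simp [List.countP_eq_length_filter]
  have hB : (parole.map (fun w => pvMask w.toList)).foldl
      (fun n wm => if (wm &&& c.foldl (fun m ch => m ||| (1 <<< (ch.toNat - 97))) 0 == 0) then n + 1 else n) (0 : Int)
      = ((parole.countP fun e => pvEvita e.toList c : Nat) : Int) := by
    rw [PySem.List.foldl_if_add_one]
    rw [List.countP_map]
    have : ∀ e ∈ parole,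
        ((fun wm => (wm &&& c.foldl (fun m ch => m ||| (1 <<< (ch.toNat - 97))) 0 == 0)) ∘ fun w => pvMask w.toList) e
          = pvEvita e.toList c := by
      intro e _
      exact mask_and_zero_iff e.toList c hc
    rw [List.countP_congr (by intro e he; rw [this e he])]
    simp
  simp only []
  rw [hA, hB]
  have hcount : ((parole.countP fun e => pvEvita e.toList c : Nat) : Int) * 2 > (parole.length : Int)
      ↔ ((parole.countP fun e => pvEvita e.toList c : Nat) : Int) > (parole.length : Int) - ((parole.countP fun e => pvEvita e.toList c : Nat) : Int) := by
    omega
  by_cases h : ((parole.countP fun e => pvEvita e.toList c : Nat) : Int) * 2 > (parole.length : Int)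
  · rw [if_pos (hcount.mp h), if_pos h]
  · rw [if_neg (fun hh => h (hcount.mpr hh)), if_neg h]

-- ===== VERDICT (by name: the statement is the Claim_ definition above) =====
theorem trovaCombinazione_spec : Claim_equal_trovaCombinazione := by
  intro parole _
  unfold Spec_trovaCombinazione trovaCombinazione trovaCombinazione_alt
  apply PySem.List.foldl_congr_mem
  intro best c hc
  have hsub : ∀ ch ∈ c, 'a' ≤ ch ∧ ch ≤ 'z' := by
    intro ch hch
    exact pvAlphabet_lower ch ((PySem.List.sublist_of_mem_combinations hc).mem hch)
  exact step_eq parole c hsub best
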